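-- pv_equiv track=rewrite | github.com/NoBaseCase/leetcode | python/AdventOfCode2023/day1.py | get_second_number
-- ===== SOURCE A (Python) =====
-- valid_numbers = {
--     "one": "1",
--     "two": "2",
--     "three": "3",
--     "four": "4",
--     "five": "5",
--     "six": "6",
--     "seven": "7",
--     "eight": "8",
--     "nine": "9",
-- }
--
-- def get_second_number(input):
--     # since the second digit is the rightmost valid number, we reverse the string to start at the back
--     input = input[::-1]
--     output = ""
--     for i in range(len(input)):
--         three_letter_num = input[i : i + 3]
--         # since the string is reverse, so will be the substrings that we obtain,
--         # so we must unreverse those to perform valid lookups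
--         three_letter_num = three_letter_num[::-1]
--
--         four_letter_num = input[i : i + 4]
--         four_letter_num = four_letter_num[::-1]
--
--         five_letter_num = input[i : i + 5]
--         five_letter_num = five_letter_num[::-1]
--
--         if not input[i].isalpha():
--             output = input[i]
--             break
--         if three_letter_num in valid_numbers:
--             output = valid_numbers[three_letter_num]
--             break
--         if four_letter_num in valid_numbers:
--             output = valid_numbers[four_letter_num]
--             break
--         if five_letter_num in valid_numbers:
--             output = valid_numbers[five_letter_num]
--             break
--     return output
-- ===== SOURCE B (Python) =====
-- valid_numbers = {
--     "one": "1",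
--     "two": "2",
--     "three": "3",
--     "four": "4",
--     "five": "5",
--     "six": "6",
--     "seven": "7",
--     "eight": "8",
--     "nine": "9",
-- }
--
-- def get_second_number(input):
--     # forward single pass: keep a sliding window of the last 5 chars and
--     # overwrite the answer on every match; the final value is the rightmost one
--     output = ""
--     window = ""
--     for ch in input:
--         window = (window + ch)[-5:]
--         if not ch.isalpha():
--             output = ch
--         elif window[-3:] in valid_numbers:
--             output = valid_numbers[window[-3:]]
--         elif window[-4:] in valid_numbers:
--             output = valid_numbers[window[-4:]]
--         elif window in valid_numbers:
--             output = valid_numbers[window]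
--     return output
-- ===== Notes on version B (the rewrite author's own statement) =====
-- stated objective: alternative
-- what changed: Replaces A's reverse-the-string scan with break-on-first-match (re-reversing three substrings at every index) by a single forward pass keeping a 5-char sliding window and overwriting the answer on every match, so the last overwrite is the rightmost match.
import Mathlib
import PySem

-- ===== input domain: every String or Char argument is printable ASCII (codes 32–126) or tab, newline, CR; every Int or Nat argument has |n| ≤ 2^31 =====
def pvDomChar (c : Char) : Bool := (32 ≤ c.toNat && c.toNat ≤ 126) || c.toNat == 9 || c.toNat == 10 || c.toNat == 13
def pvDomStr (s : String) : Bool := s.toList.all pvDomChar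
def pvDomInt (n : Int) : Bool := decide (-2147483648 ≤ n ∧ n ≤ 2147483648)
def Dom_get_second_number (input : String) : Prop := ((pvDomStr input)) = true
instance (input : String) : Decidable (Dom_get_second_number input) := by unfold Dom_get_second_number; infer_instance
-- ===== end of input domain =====

-- B replaces A's reverse scan-and-break by a forward sliding-window pass that overwrites the answer (same cost, different decomposition).

-- ===== PORT A =====
def pvValidNumbers : PySem.Dict String String :=
  ⟨[("one","1"),("two","2"),("three","3"),("four","4"),("five","5"),
    ("six","6"),("seven","7"),("eight","8"),("nine","9")]⟩

def pvLook (w : List Char) : Option String := PySem.Dict.get? pvValidNumbers (String.ofList w)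

-- loop of A over the reversed character list; the suffix starting at index i is
-- consumed structurally, so input[i:i+k] is `take k` of it and input[i] its head
def pvGoA : List Char → String
  | [] => ""
  | c :: rest =>
    let three := ((c :: rest).take 3).reverse
    let four  := ((c :: rest).take 4).reverse
    let five  := ((c :: rest).take 5).reverse
    if ¬ PySem.Chars.isalpha c then String.ofList [c]
    else match pvLook three with
      | some v => v
      | none => match pvLook four with
        | some v => v
        | none => match pvLook five with
          | some v => v
          | none => pvGoA rest

def get_second_number (input : String) : String := pvGoA input.toList.reverse

-- ===== PORT B =====
def pvStepB (st : String × List Char) (ch : Char) : String × List Char :=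
  let window := PySem.List.slice (st.2 ++ [ch]) (some (-5)) none
  let out :=
    if ¬ PySem.Chars.isalpha ch then String.ofList [ch]
    else match pvLook (PySem.List.slice window (some (-3)) none) with
      | some v => v
      | none => match pvLook (PySem.List.slice window (some (-4)) none) with
        | some v => v
        | none => match pvLook window with
          | some v => v
          | none => st.1
  (out, window)

def get_second_number_alt (input : String) : String :=
  (input.toList.foldl pvStepB ("", [])).1

-- ===== PRECONDITION & SPEC =====
def Spec_get_second_number (input : String) (out : String) : Prop := out = get_second_number_alt input
instance (input : String) (out : String) : Decidable (Spec_get_second_number input out) := by unfold Spec_get_second_number; infer_instance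

-- ===== CLAIM (what is proved, stated in full; the proofs are below) =====
def Claim_equal_get_second_number : Prop := ∀ (input : String), Dom_get_second_number input → Spec_get_second_number input (get_second_number input)

-- ===== LEMMAS AND PROOFS =====

-- the last k characters of xs (what the negative slices compute)
def pvLastN (k : Nat) (xs : List Char) : List Char := xs.drop (xs.length - k)

-- the match both programs detect at a nonempty prefix q of the input
def pvMatch (q : List Char) : Option String :=
  match q.getLast? with
  | none => none
  | some c =>
    if ¬ PySem.Chars.isalpha c then some (String.ofList [c])
    else match pvLook (pvLastN 3 q) with
      | some v => some v
      | none => match pvLook (pvLastN 4 q) with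
        | some v => some v
        | none => pvLook (pvLastN 5 q)

-- abstract forward pass over full prefixes
def pvRunB : List Char → List Char → String → String
  | [], _, out => out
  | ch :: rest, q, out =>
    pvRunB rest (q ++ [ch]) (match pvMatch (q ++ [ch]) with | some v => v | none => out)

theorem pvLastN_reverse (k : Nat) (xs : List Char) :
    pvLastN k xs = (xs.reverse.take k).reverse := by
  simp [pvLastN, List.take_reverse]

theorem pvLastN_lastN (j k : Nat) (h : j ≤ k) (xs : List Char) :
    pvLastN j (pvLastN k xs) = pvLastN j xs := by
  simp only [pvLastN, List.drop_drop, List.length_drop]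
  congr 1
  omega

theorem pvLastN_append (k : Nat) (hk : 0 < k) (xs : List Char) (c : Char) :
    pvLastN k (xs ++ [c]) = pvLastN (k - 1) xs ++ [c] := by
  simp only [pvLastN, List.length_append, List.length_singleton]
  rw [List.drop_append_of_le_length (by omega),
      show xs.length + 1 - k = xs.length - (k - 1) by omega]

theorem pvWindow_append (q : List Char) (c : Char) :
    pvLastN 5 (pvLastN 5 q ++ [c]) = pvLastN 5 (q ++ [c]) := by
  rw [pvLastN_append 5 (by omega), pvLastN_append 5 (by omega),
      pvLastN_lastN 4 5 (by omega)]

theorem pvMatch_append (q : List Char) (c : Char) :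
    pvMatch (q ++ [c]) =
      if ¬ PySem.Chars.isalpha c then some (String.ofList [c])
      else match pvLook (pvLastN 3 (q ++ [c])) with
        | some v => some v
        | none => match pvLook (pvLastN 4 (q ++ [c])) with
          | some v => some v
          | none => pvLook (pvLastN 5 (q ++ [c])) := by
  simp [pvMatch]

-- one step of B, phrased over the full processed prefix q
theorem pvStepB_match (q : List Char) (out : String) (ch : Char) :
    pvStepB (out, pvLastN 5 q) ch =
      ((match pvMatch (q ++ [ch]) with | some v => v | none => out),
        pvLastN 5 (q ++ [ch])) := by
  have hw : PySem.List.slice (pvLastN 5 q ++ [ch]) (some (-5)) none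
      = pvLastN 5 (q ++ [ch]) := by
    rw [PySem.List.slice_from_neg_ofNat _ 5 (by omega)]
    exact pvWindow_append q ch
  have h3 : PySem.List.slice (pvLastN 5 (q ++ [ch])) (some (-3)) none
      = pvLastN 3 (q ++ [ch]) := by
    rw [PySem.List.slice_from_neg_ofNat _ 3 (by omega)]
    exact pvLastN_lastN 3 5 (by omega) _
  have h4 : PySem.List.slice (pvLastN 5 (q ++ [ch])) (some (-4)) none
      = pvLastN 4 (q ++ [ch]) := by
    rw [PySem.List.slice_from_neg_ofNat _ 4 (by omega)]
    exact pvLastN_lastN 4 5 (by omega) _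
  simp only [pvStepB, hw, h3, h4, pvMatch_append]
  cases ha : PySem.Chars.isalpha ch
  · simp
  · simp only [not_true_eq_false, if_false]
    cases pvLook (pvLastN 3 (q ++ [ch])) <;>
      cases pvLook (pvLastN 4 (q ++ [ch])) <;>
      cases pvLook (pvLastN 5 (q ++ [ch])) <;> rfl

theorem pvGoA_cons (c : Char) (rest : List Char) :
    pvGoA (c :: rest) =
      match pvMatch ((c :: rest).reverse) with
      | some v => v
      | none => pvGoA rest := by
  have h3 : pvLastN 3 ((c :: rest).reverse) = ((c :: rest).take 3).reverse := by
    rw [pvLastN_reverse]; simp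
  have h4 : pvLastN 4 ((c :: rest).reverse) = ((c :: rest).take 4).reverse := by
    rw [pvLastN_reverse]; simp
  have h5 : pvLastN 5 ((c :: rest).reverse) = ((c :: rest).take 5).reverse := by
    rw [pvLastN_reverse]; simp
  have hl : ((c :: rest).reverse).getLast? = some c := by
    simp [List.reverse_cons]
  simp only [pvGoA, pvMatch, hl, h3, h4, h5]
  cases ha : PySem.Chars.isalpha c
  · simp
  · simp only [not_true_eq_false, if_false]
    cases pvLook ((c :: rest).take 3).reverse <;>
      cases pvLook ((c :: rest).take 4).reverse <;>
      cases pvLook ((c :: rest).take 5).reverse <;> rfl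

theorem pvFoldB (l : List Char) : ∀ (q : List Char) (out : String),
    (l.foldl pvStepB (out, pvLastN 5 q)).1 = pvRunB l q out := by
  induction l with
  | nil => intro q out; rfl
  | cons ch rest ih =>
    intro q out
    rw [List.foldl_cons, pvStepB_match, pvRunB, ih]

theorem pvRunB_append (l₁ l₂ : List Char) : ∀ (q : List Char) (out : String),
    pvRunB (l₁ ++ l₂) q out = pvRunB l₂ (q ++ l₁) (pvRunB l₁ q out) := by
  induction l₁ with
  | nil => intro q out; simp [pvRunB]
  | cons c rest ih =>
    intro q out
    simp only [List.cons_append, pvRunB, ih, List.append_assoc, List.nil_append]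

theorem pvAB (l : List Char) : pvGoA l.reverse = pvRunB l [] "" := by
  induction l using List.reverseRecOn with
  | nil => rfl
  | append_singleton l c ih =>
    rw [List.reverse_append, List.reverse_singleton, List.singleton_append,
        pvGoA_cons, pvRunB_append]
    simp only [List.reverse_cons, List.reverse_reverse, List.nil_append, pvRunB]
    cases pvMatch (l ++ [c]) <;> simp [ih]

-- ===== VERDICT (by name: the statement is the Claim_ definition above) =====
theorem get_second_number_spec : Claim_equal_get_second_number := by
  intro input _
  show get_second_number input = get_second_number_alt input
  unfold get_second_number get_second_number_alt
  rw [pvAB,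
      show (("", ([] : List Char)) : String × List Char) = ("", pvLastN 5 []) from rfl,
      pvFoldB]
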